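-- pv_equiv track=rewrite | github.com/timewinder-dev/timewinder-prototype | tests/temporal_fuzz/test_temporal_basics.py | alwaysEventually_bool
-- ===== SOURCE A (Python) =====
-- from typing import List
--
-- TTrace = List[bool]
--
-- def eventually_bool(l: TTrace) -> bool:
--     return any(l)
--
-- def alwaysEventually_bool(l: TTrace) -> bool:
--     if len(l) == 0:
--         return False
--     if len(l) == 1:
--         return l[0]
--     if l[0] is True:
--         return alwaysEventually_bool(l[1:])
--     else:
--         return eventually_bool(l[1:]) and alwaysEventually_bool(l[1:])
-- ===== SOURCE B (Python) =====
-- from typing import List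
--
-- TTrace = List[bool]
--
-- def alwaysEventually_bool(l: TTrace) -> bool:
--     # AE over a finite trace reduces to its final value: a True suffix-head
--     # is only kept if every later suffix still contains a True, which holds
--     # iff the last element is True.
--     return l[-1] if l else False
-- ===== Notes on version B (the rewrite author's own statement) =====
-- stated objective: faster
-- what changed: Replaced the recursion that rescans each suffix (any(l[1:]) inside a recursion over suffixes) by the closed form: the answer is the last element of the trace (False if empty).
import Mathlib
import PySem

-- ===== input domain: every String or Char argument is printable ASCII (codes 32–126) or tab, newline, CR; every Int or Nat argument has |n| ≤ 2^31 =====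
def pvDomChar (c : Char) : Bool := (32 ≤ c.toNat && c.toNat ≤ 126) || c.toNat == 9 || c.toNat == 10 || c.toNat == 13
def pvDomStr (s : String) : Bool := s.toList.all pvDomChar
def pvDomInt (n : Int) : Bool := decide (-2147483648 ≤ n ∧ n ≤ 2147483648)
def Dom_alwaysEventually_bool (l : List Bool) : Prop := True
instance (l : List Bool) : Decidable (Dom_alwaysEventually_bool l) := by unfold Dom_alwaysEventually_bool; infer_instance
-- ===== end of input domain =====

-- B computes the same value in O(1): the last element (False on the empty trace).

-- ===== PORT A =====
-- eventually_bool(l) = any(l)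
def eventually_bool (l : List Bool) : Bool := l.any id

-- recursion on the tail mirrors the Python recursion on l[1:]
def alwaysEventually_bool : List Bool → Bool
  | [] => false
  | [x] => x
  | x :: xs =>
      if x = true then alwaysEventually_bool xs
      else eventually_bool xs && alwaysEventually_bool xs

-- ===== PORT B =====
def alwaysEventually_bool_alt (l : List Bool) : Bool := l.getLastD false

-- ===== PRECONDITION & SPEC =====
def Spec_alwaysEventually_bool (l : List Bool) (out : Bool) : Prop := out = alwaysEventually_bool_alt l
instance (l : List Bool) (out : Bool) : Decidable (Spec_alwaysEventually_bool l out) := by unfold Spec_alwaysEventually_bool; infer_instance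

-- ===== CLAIM (what is proved, stated in full; the proofs are below) =====
def Claim_equal_alwaysEventually_bool : Prop := ∀ (l : List Bool), Dom_alwaysEventually_bool l → Spec_alwaysEventually_bool l (alwaysEventually_bool l)

-- ===== LEMMAS AND PROOFS =====
-- a nonempty list whose last element is true contains a true element
theorem any_of_getLastD : ∀ (l : List Bool), l.getLastD false = true → l.any id = true
  | [x], h => by simpa using h
  | x :: y :: xs, h => by
    have := any_of_getLastD (y :: xs) (by simpa using h)
    simp at this ⊢
    tauto

theorem alwaysEventually_eq_getLastD : ∀ (l : List Bool), alwaysEventually_bool l = l.getLastD false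
  | [] => rfl
  | [x] => rfl
  | x :: y :: xs => by
    have ih := alwaysEventually_eq_getLastD (y :: xs)
    by_cases hx : x = true
    · simp [alwaysEventually_bool, hx, ih]
    · cases hlast : (y :: xs).getLastD false with
      | false =>
        have hlast' : (y :: xs).getLast?.getD false = false := by
          simpa [List.getLastD_eq_getLast?] using hlast
        simp [alwaysEventually_bool, hx, ih, hlast']
      | true =>
        have hany := any_of_getLastD (y :: xs) hlast
        simp [alwaysEventually_bool, hx, ih, eventually_bool, hany]

-- ===== VERDICT (by name: the statement is the Claim_ definition above) =====
theorem alwaysEventually_bool_spec : Claim_equal_alwaysEventually_bool := by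
  intro l _
  unfold Spec_alwaysEventually_bool alwaysEventually_bool_alt
  exact alwaysEventually_eq_getLastD l
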